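-- pv_equiv track=rewrite | github.com/sonwr/sonwr.github.io | 2024_nlp/hw2/rnn_spacing.py | make_sentence
-- ===== SOURCE A (Python) =====
-- def make_sentence(inputs, predicts, labels, idx2eumjeol, idx2label):
--     predict_sentence, correct_sentence = "", ""
--     for index in range(len(inputs)):
--         eumjeol = idx2eumjeol[inputs[index]]
--         correct_label = idx2label[labels[index]]
--         predict_label = idx2label[predicts[index]]
--         if (index == 0):
--             predict_sentence += eumjeol
--             correct_sentence += eumjeol
--             continue
--         if (predict_label == "B"):
--             predict_sentence += " "
--         predict_sentence += eumjeol
--         if (correct_label == "B"):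
--             correct_sentence += " "
--         correct_sentence += eumjeol
--     return predict_sentence, correct_sentence
-- ===== SOURCE B (Python) =====
-- def make_sentence(inputs, predicts, labels, idx2eumjeol, idx2label):
--     # Boundary-index algorithm: look up all eumjeols once, compute the cut
--     # positions (indices > 0 whose label is "B"), and assemble each sentence by
--     # slicing the token list at those cuts and joining the slices with spaces.
--     n = len(inputs)
--     tokens = [idx2eumjeol[i] for i in inputs]
--     def spaced(label_ids):
--         cuts = [i for i in range(1, n) if idx2label[label_ids[i]] == "B"]
--         bounds = [0] + cuts + [n]
--         return " ".join("".join(tokens[a:b]) for a, b in zip(bounds, bounds[1:]))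
--     return spaced(predicts), spaced(labels)
-- ===== Notes on version B (the rewrite author's own statement) =====
-- stated objective: alternative
-- what changed: Replaces A's stateful walk that grows two strings by conditionally prepending spaces with a boundary-index algorithm: look up all eumjeols once into a token list, compute the list of cut positions (indices > 0 whose label maps to 'B'), form the consecutive bound pairs, and assemble each sentence by slicing the token list at those bounds and joining the slices with spaces.
import Mathlib
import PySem

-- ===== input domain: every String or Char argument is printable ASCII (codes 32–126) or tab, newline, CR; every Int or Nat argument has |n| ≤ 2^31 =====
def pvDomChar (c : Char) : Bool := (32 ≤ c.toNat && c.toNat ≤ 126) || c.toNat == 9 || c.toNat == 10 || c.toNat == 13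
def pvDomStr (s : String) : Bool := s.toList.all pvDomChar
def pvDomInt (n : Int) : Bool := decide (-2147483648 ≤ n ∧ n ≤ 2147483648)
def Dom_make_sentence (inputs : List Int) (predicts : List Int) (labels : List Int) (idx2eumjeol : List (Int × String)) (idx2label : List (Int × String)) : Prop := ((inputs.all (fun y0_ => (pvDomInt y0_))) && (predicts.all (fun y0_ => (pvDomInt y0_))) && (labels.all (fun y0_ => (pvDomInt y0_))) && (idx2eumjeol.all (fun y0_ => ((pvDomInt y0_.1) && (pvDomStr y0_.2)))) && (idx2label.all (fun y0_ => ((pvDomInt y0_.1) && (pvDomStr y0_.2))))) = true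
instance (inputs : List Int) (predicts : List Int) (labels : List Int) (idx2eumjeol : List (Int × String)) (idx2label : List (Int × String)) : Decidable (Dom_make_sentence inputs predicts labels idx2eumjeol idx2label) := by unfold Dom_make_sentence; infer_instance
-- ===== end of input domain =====

-- B replaces A's stateful space-prepending string walk by a boundary-index algorithm
-- (token list + cut positions + slice-and-join); objective: alternative structure, same cost.

-- ===== PORT A =====
-- literal transliteration of A: one pass over range(len(inputs)) carrying the two growing strings
def make_sentence (inputs : List Int) (predicts : List Int) (labels : List Int) (idx2eumjeol : List (Int × String)) (idx2label : List (Int × String)) : String × String :=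
  (PySem.List.pyRange 0 (PySem.List.len inputs)).foldl
    (fun (st : String × String) (index : Int) =>
      let eumjeol := PySem.Dict.getD (PySem.Dict.mk idx2eumjeol) (PySem.List.pyGetD inputs index 0) ""
      let correct_label := PySem.Dict.getD (PySem.Dict.mk idx2label) (PySem.List.pyGetD labels index 0) ""
      let predict_label := PySem.Dict.getD (PySem.Dict.mk idx2label) (PySem.List.pyGetD predicts index 0) ""
      if index == 0 then
        (st.1 ++ eumjeol, st.2 ++ eumjeol)
      else
        ((if predict_label == "B" then st.1 ++ " " else st.1) ++ eumjeol,
         (if correct_label == "B" then st.2 ++ " " else st.2) ++ eumjeol))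
    ("", "")

-- ===== PORT B =====
-- Source B: tokens via one lookup pass, cut positions, bound pairs, slice-and-join
def make_sentence_alt (inputs : List Int) (predicts : List Int) (labels : List Int) (idx2eumjeol : List (Int × String)) (idx2label : List (Int × String)) : String × String :=
  let n : Int := PySem.List.len inputs
  let tokens : List String := inputs.map (fun i => PySem.Dict.getD (PySem.Dict.mk idx2eumjeol) i "")
  let spaced : List Int → String := fun label_ids =>
    let cuts := (PySem.List.pyRange 1 n).filter
      (fun i => PySem.Dict.getD (PySem.Dict.mk idx2label) (PySem.List.pyGetD label_ids i 0) "" == "B")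
    let bounds := 0 :: (cuts ++ [n])
    PySem.Str.join " "
      ((bounds.zip bounds.tail).map
        (fun p => PySem.Str.join "" (PySem.List.slice tokens (some p.1) (some p.2))))
  (spaced predicts, spaced labels)

-- ===== PRECONDITION & SPEC =====
-- Pre_ excludes exactly the inputs on which Python A raises: an IndexError when predicts or
-- labels is shorter than inputs, and a KeyError when a used index is missing from its dict.
def Pre_make_sentence (inputs : List Int) (predicts : List Int) (labels : List Int) (idx2eumjeol : List (Int × String)) (idx2label : List (Int × String)) : Prop :=
  inputs.length ≤ predicts.length ∧ inputs.length ≤ labels.length ∧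
  (∀ x ∈ inputs, (PySem.Dict.get? (PySem.Dict.mk idx2eumjeol) x).isSome) ∧
  (∀ x ∈ predicts.take inputs.length, (PySem.Dict.get? (PySem.Dict.mk idx2label) x).isSome) ∧
  (∀ x ∈ labels.take inputs.length, (PySem.Dict.get? (PySem.Dict.mk idx2label) x).isSome)
instance (inputs : List Int) (predicts : List Int) (labels : List Int) (idx2eumjeol : List (Int × String)) (idx2label : List (Int × String)) : Decidable (Pre_make_sentence inputs predicts labels idx2eumjeol idx2label) := by unfold Pre_make_sentence; infer_instance

def pvWitness_make_sentence : List Int × List Int × List Int × (List (Int × String)) × (List (Int × String)) :=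
  ([0, 1, 0], [0, 1, 0], [0, 0, 1], [(0, "ab"), (1, "c")], [(0, "B"), (1, "I")])

def Spec_make_sentence (inputs : List Int) (predicts : List Int) (labels : List Int) (idx2eumjeol : List (Int × String)) (idx2label : List (Int × String)) (out : String × String) : Prop := out = make_sentence_alt inputs predicts labels idx2eumjeol idx2label
instance (inputs : List Int) (predicts : List Int) (labels : List Int) (idx2eumjeol : List (Int × String)) (idx2label : List (Int × String)) (out : String × String) : Decidable (Spec_make_sentence inputs predicts labels idx2eumjeol idx2label out) := by unfold Spec_make_sentence; infer_instance

-- ===== CLAIM (what is proved, stated in full; the proofs are below) =====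
def Claim_equal_make_sentence : Prop := ∀ (inputs : List Int) (predicts : List Int) (labels : List Int) (idx2eumjeol : List (Int × String)) (idx2label : List (Int × String)), Dom_make_sentence inputs predicts labels idx2eumjeol idx2label → Pre_make_sentence inputs predicts labels idx2eumjeol idx2label → Spec_make_sentence inputs predicts labels idx2eumjeol idx2label (make_sentence inputs predicts labels idx2eumjeol idx2label)

-- ===== LEMMAS AND PROOFS =====

-- single-sentence step of A (string accumulator)
def stepS (idx2eumjeol idx2label : List (Int × String)) (inputs lab : List Int) (s : String) (i : Int) : String :=
  let em := PySem.Dict.getD (PySem.Dict.mk idx2eumjeol) (PySem.List.pyGetD inputs i 0) ""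
  if i == 0 then s ++ em
  else (if PySem.Dict.getD (PySem.Dict.mk idx2label) (PySem.List.pyGetD lab i 0) "" == "B" then s ++ " " else s) ++ em

-- B-side pieces, per sentence
def msTok (idx2eumjeol : List (Int × String)) (inputs : List Int) : List String :=
  inputs.map (fun i => PySem.Dict.getD (PySem.Dict.mk idx2eumjeol) i "")

def msFlag (idx2label : List (Int × String)) (lab : List Int) (i : Int) : Bool :=
  PySem.Dict.getD (PySem.Dict.mk idx2label) (PySem.List.pyGetD lab i 0) "" == "B"

def msCuts (idx2label : List (Int × String)) (lab : List Int) (n : Int) : List Int :=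
  (PySem.List.pyRange 1 n).filter (msFlag idx2label lab)

def msSeg (idx2eumjeol : List (Int × String)) (inputs : List Int) (p : Int × Int) : String :=
  PySem.Str.join "" (PySem.List.slice (msTok idx2eumjeol inputs) (some p.1) (some p.2))

def msWords (idx2eumjeol idx2label : List (Int × String)) (inputs lab : List Int) (n : Int) : List String :=
  ((0 :: (msCuts idx2label lab n ++ [n])).zip (0 :: (msCuts idx2label lab n ++ [n])).tail).map
    (msSeg idx2eumjeol inputs)

def msPre (idx2eumjeol idx2label : List (Int × String)) (inputs lab : List Int) (n : Int) : List String :=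
  ((0 :: msCuts idx2label lab n).zip (0 :: msCuts idx2label lab n).tail).map (msSeg idx2eumjeol inputs)

def msLast (idx2label : List (Int × String)) (lab : List Int) (n : Int) : Int :=
  (0 :: msCuts idx2label lab n).getLastD 0

theorem make_sentence_eq_folds (inputs predicts labels : List Int) (e l : List (Int × String)) :
    make_sentence inputs predicts labels e l =
      ((PySem.List.pyRange 0 (PySem.List.len inputs)).foldl (stepS e l inputs predicts) "",
       (PySem.List.pyRange 0 (PySem.List.len inputs)).foldl (stepS e l inputs labels) "") := by
  unfold make_sentence
  rw [show (fun (st : String × String) (index : Int) =>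
      let eumjeol := PySem.Dict.getD (PySem.Dict.mk e) (PySem.List.pyGetD inputs index 0) ""
      let correct_label := PySem.Dict.getD (PySem.Dict.mk l) (PySem.List.pyGetD labels index 0) ""
      let predict_label := PySem.Dict.getD (PySem.Dict.mk l) (PySem.List.pyGetD predicts index 0) ""
      if index == 0 then
        (st.1 ++ eumjeol, st.2 ++ eumjeol)
      else
        ((if predict_label == "B" then st.1 ++ " " else st.1) ++ eumjeol,
         (if correct_label == "B" then st.2 ++ " " else st.2) ++ eumjeol)) =
      (fun (st : String × String) (index : Int) =>
        (stepS e l inputs predicts st.1 index, stepS e l inputs labels st.2 index)) from by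
    funext st index
    simp only [stepS]
    split <;> rfl]
  exact PySem.List.foldl_prod_mk _ _ _ _ _

theorem alt_eq_words (inputs predicts labels : List Int) (e l : List (Int × String)) :
    make_sentence_alt inputs predicts labels e l =
      (PySem.Str.join " " (msWords e l inputs predicts (PySem.List.len inputs)),
       PySem.Str.join " " (msWords e l inputs labels (PySem.List.len inputs))) := rfl

-- String-join facts
theorem cjoin_cons (sep x : List Char) (ws : List (List Char)) (h : ws ≠ []) :
    PySem.Chars.join sep (x :: ws) = x ++ sep ++ PySem.Chars.join sep ws := by
  cases ws with
  | nil => exact absurd rfl h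
  | cons y t => exact PySem.Chars.join_cons_cons sep x y t

theorem cjoin_append_singleton (sep e : List Char) (ws : List (List Char)) (h : ws ≠ []) :
    PySem.Chars.join sep (ws ++ [e]) = PySem.Chars.join sep ws ++ sep ++ e := by
  induction ws with
  | nil => exact absurd rfl h
  | cons x t ih =>
    cases t with
    | nil => simp [PySem.Chars.join_cons_cons, PySem.Chars.join_singleton]
    | cons y t' =>
      rw [List.cons_append, PySem.Chars.join_cons_cons,
        cjoin_cons sep x (y :: t' ++ [e]) (by simp), ih (by simp)]
      simp [List.append_assoc]

theorem cjoin_snoc_extend (sep x y : List Char) (ws : List (List Char)) :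
    PySem.Chars.join sep (ws ++ [x ++ y]) = PySem.Chars.join sep (ws ++ [x]) ++ y := by
  induction ws with
  | nil => simp [PySem.Chars.join_singleton]
  | cons a t ih =>
    rw [List.cons_append, List.cons_append,
      cjoin_cons sep a (t ++ [x ++ y]) (by simp),
      cjoin_cons sep a (t ++ [x]) (by simp), ih]
    simp [List.append_assoc]

theorem join_append_singleton (ws : List String) (e : String) (h : ws ≠ []) :
    PySem.Str.join " " (ws ++ [e]) = PySem.Str.join " " ws ++ " " ++ e := by
  apply String.toList_inj.mp
  simp only [PySem.Str.toList_join, List.map_append, List.map_cons, List.map_nil,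
    String.toList_append]
  exact cjoin_append_singleton " ".toList e.toList (ws.map String.toList)
    (by simpa using h)

theorem join_snoc_extend (ws : List String) (x y : String) :
    PySem.Str.join " " (ws ++ [x ++ y]) = PySem.Str.join " " (ws ++ [x]) ++ y := by
  apply String.toList_inj.mp
  simp only [PySem.Str.toList_join, List.map_append, List.map_cons, List.map_nil,
    String.toList_append]
  exact cjoin_snoc_extend " ".toList x.toList y.toList (ws.map String.toList)

theorem join_singleton_str (x : String) : PySem.Str.join " " [x] = x := by
  apply String.toList_inj.mp
  simp [PySem.Str.toList_join, PySem.Chars.join_singleton]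

theorem joinE_singleton (x : String) : PySem.Str.join "" [x] = x := by
  apply String.toList_inj.mp
  simp [PySem.Str.toList_join, PySem.Chars.join_singleton]

theorem joinE_nil : PySem.Str.join "" ([] : List String) = "" := by
  apply String.toList_inj.mp
  simp [PySem.Str.toList_join, PySem.Chars.join_nil]

theorem joinE_append_singleton (ws : List String) (x : String) :
    PySem.Str.join "" (ws ++ [x]) = PySem.Str.join "" ws ++ x := by
  cases ws with
  | nil => simp [joinE_singleton, joinE_nil]
  | cons a t =>
    apply String.toList_inj.mp
    simp only [PySem.Str.toList_join, List.map_append, List.map_cons, List.map_nil,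
      String.toList_append]
    have h := cjoin_append_singleton "".toList x.toList ((a :: t).map String.toList) (by simp)
    simpa using h

-- zip-with-tail of a list with one more element at the end
theorem zipTail_append_singleton (l : List Int) (x : Int) (h : l ≠ []) :
    (l ++ [x]).zip (l ++ [x]).tail = l.zip l.tail ++ [(l.getLastD 0, x)] := by
  induction l with
  | nil => exact absurd rfl h
  | cons a t ih =>
    cases t with
    | nil => simp
    | cons b t' =>
      have := ih (by simp)
      simp only [List.cons_append, List.tail_cons, List.zip_cons_cons] at this ⊢
      rw [this]
      simp

-- slicing one more token
theorem slice_extend (tokens : List String) (L : Int) (n : Nat)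
    (h0 : 0 ≤ L) (h1 : L ≤ (n : Int)) (h2 : n < tokens.length) :
    PySem.List.slice tokens (some L) (some ((n : Int) + 1)) =
      PySem.List.slice tokens (some L) (some (n : Int)) ++ [tokens[n]] := by
  rw [PySem.List.slice_toNat tokens h0 (by omega : (0:Int) ≤ (n : Int) + 1),
    PySem.List.slice_toNat tokens h0 (by omega : (0:Int) ≤ (n : Int))]
  have hn1 : ((n : Int) + 1).toNat = n + 1 := by omega
  have hn : ((n : Int)).toNat = n := by omega
  rw [hn1, hn]
  have hc : L.toNat ≤ n := by omega
  have hsub : n + 1 - L.toNat = (n - L.toNat) + 1 := by omega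
  rw [hsub, List.take_add_one]
  congr 1
  have hi : L.toNat + (n - L.toNat) = n := by omega
  rw [List.getElem?_drop, hi, List.getElem?_eq_getElem h2]
  rfl

theorem slice_single (tokens : List String) (n : Nat) (h : n < tokens.length) :
    PySem.List.slice tokens (some (n : Int)) (some ((n : Int) + 1)) = [tokens[n]] := by
  rw [slice_extend tokens (n : Int) n (by omega) le_rfl h,
    PySem.List.slice_toNat tokens (by omega : (0:Int) ≤ (n:Int)) (by omega : (0:Int) ≤ (n:Int))]
  simp

theorem mem_msCuts (l : List (Int × String)) (lab : List Int) (n : Int) (c : Int)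
    (h : c ∈ msCuts l lab n) : 1 ≤ c ∧ c < n := by
  unfold msCuts at h
  have := List.mem_filter.mp h
  exact PySem.List.mem_pyRange_one.mp this.1

-- the cut list grows by at most one on the right
theorem msCuts_succ (l : List (Int × String)) (lab : List Int) (n : Nat) (h : 1 ≤ n) :
    msCuts l lab ((n : Int) + 1) =
      msCuts l lab (n : Int) ++ (if msFlag l lab (n : Int) then [(n : Int)] else []) := by
  unfold msCuts
  rw [PySem.List.pyRange_one_succ_right (by exact_mod_cast h), List.filter_append,
    List.filter_cons, List.filter_nil]

-- every word list decomposes as prefix ++ [last segment]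
theorem msWords_decomp (e l : List (Int × String)) (inputs lab : List Int) (n : Int) :
    msWords e l inputs lab n =
      msPre e l inputs lab n ++ [msSeg e inputs (msLast l lab n, n)] := by
  unfold msWords msPre msLast
  rw [show (0 : Int) :: (msCuts l lab n ++ [n]) = (0 :: msCuts l lab n) ++ [n] from rfl,
    zipTail_append_singleton (0 :: msCuts l lab n) n (by simp), List.map_append]
  rfl

theorem msLast_bounds (l : List (Int × String)) (lab : List Int) (n : Int) (hn : 0 ≤ n) :
    0 ≤ msLast l lab n ∧ msLast l lab n ≤ n := by
  unfold msLast
  rcases hc : msCuts l lab n with _ | ⟨c, t⟩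
  · simpa using hn
  · have hmem : (c :: t).getLastD 0 ∈ (c :: t) := by
      have h' := List.getLast?_eq_some_getLast (l := c :: t) (by simp)
      rw [List.getLastD_eq_getLast?, h', Option.getD_some]
      exact List.getLast_mem _
    have hmem2 : (c :: t).getLastD 0 ∈ msCuts l lab n := by rw [hc]; exact hmem
    have := mem_msCuts l lab n _ hmem2
    rw [List.getLastD_cons]
    omega

-- token at a valid position
theorem msTok_getElem (e : List (Int × String)) (inputs : List Int) (n : Nat) (h : n < inputs.length) :
    (msTok e inputs)[n]'(by simpa [msTok] using h) =
      PySem.Dict.getD (PySem.Dict.mk e) (PySem.List.pyGetD inputs (n : Int) 0) "" := by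
  unfold msTok
  rw [List.getElem_map, PySem.List.pyGetD_natCast]
  congr 1
  exact (List.getD_eq_getElem inputs 0 h).symm

-- the invariant: A's fold over the first n indices equals B's slice-and-join at bound n
theorem fold_eq_words (e l : List (Int × String)) (inputs lab : List Int) (n : Nat) :
    n ≤ inputs.length →
    (PySem.List.pyRange 0 (n : Int)).foldl (stepS e l inputs lab) "" =
      PySem.Str.join " " (msWords e l inputs lab (n : Int)) := by
  have htoklen : (msTok e inputs).length = inputs.length := by simp [msTok]
  induction n with
  | zero =>
    intro _
    rw [show ((0 : Nat) : Int) = 0 from rfl]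
    rw [PySem.List.pyRange_one_eq_nil le_rfl]
    unfold msWords msCuts
    rw [PySem.List.pyRange_one_eq_nil (by omega : (0:Int) ≤ 1)]
    simp only [List.filter_nil, List.nil_append, List.tail_cons, List.zip_cons_cons,
      List.zip_nil_right, List.map_cons, List.map_nil, List.foldl_nil]
    unfold msSeg
    rw [PySem.List.slice_toNat (msTok e inputs) (le_refl (0:Int)) (le_refl (0:Int))]
    simp only [Int.toNat_zero, Nat.sub_self, List.take_zero, List.drop_zero]
    rw [joinE_nil, join_singleton_str]
  | succ n ih =>
    intro hn
    have hlt : n < inputs.length := by omega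
    push_cast
    rw [PySem.List.pyRange_one_succ_right (by omega : (0:Int) ≤ (n:Int)),
      List.foldl_append, List.foldl_cons, List.foldl_nil, ih (by omega)]
    cases n with
    | zero =>
      -- index 0: a single word [tokens[0]]
      have hm0 : msWords e l inputs lab ((0 : Nat) : Int) = [""] := by
        unfold msWords msCuts
        rw [show (((0 : Nat) : Int)) = (0 : Int) from rfl,
          PySem.List.pyRange_one_eq_nil (by omega : (0:Int) ≤ 1)]
        simp only [List.filter_nil, List.nil_append, List.tail_cons, List.zip_cons_cons,
          List.zip_nil_right, List.map_cons, List.map_nil]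
        unfold msSeg
        rw [PySem.List.slice_toNat (msTok e inputs) (le_refl (0:Int)) (le_refl (0:Int))]
        simp only [Int.toNat_zero, Nat.sub_self, List.take_zero, List.drop_zero]
        rw [joinE_nil]
      have hm1 : msWords e l inputs lab (((0 : Nat) : Int) + 1) =
          [(msTok e inputs)[0]'(by omega)] := by
        unfold msWords msCuts
        rw [show (((0 : Nat) : Int) + 1) = (1 : Int) from rfl,
          PySem.List.pyRange_one_eq_nil (le_refl (1:Int))]
        simp only [List.filter_nil, List.nil_append, List.tail_cons, List.zip_cons_cons,
          List.zip_nil_right, List.map_cons, List.map_nil]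
        unfold msSeg
        rw [show ((1 : Int)) = ((0 : Nat) : Int) + 1 from rfl,
          show ((0 : Int)) = ((0 : Nat) : Int) from rfl,
          slice_single (msTok e inputs) 0 (by omega), joinE_singleton]
      rw [hm0, hm1, join_singleton_str, join_singleton_str]
      unfold stepS
      rw [if_pos (by simp), msTok_getElem e inputs 0 hlt]
      simp
    | succ m =>
      have h1n : (1 : Nat) ≤ m + 1 := by omega
      have hflag := msCuts_succ l lab (m + 1) h1n
      have hLb := msLast_bounds l lab ((m + 1 : Nat) : Int) (by positivity)
      by_cases hB : msFlag l lab ((m + 1 : Nat) : Int) = true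
      · -- a new word starts at index m+1
        have hcuts : msCuts l lab (((m + 1 : Nat) : Int) + 1) =
            msCuts l lab ((m + 1 : Nat) : Int) ++ [((m + 1 : Nat) : Int)] := by
          rw [hflag, if_pos hB]
        have hPre : msPre e l inputs lab (((m + 1 : Nat) : Int) + 1) =
            msWords e l inputs lab ((m + 1 : Nat) : Int) := by
          unfold msPre msWords
          rw [hcuts]
        have hLast : msLast l lab (((m + 1 : Nat) : Int) + 1) = ((m + 1 : Nat) : Int) := by
          unfold msLast
          rw [hcuts, show (0 : Int) :: (msCuts l lab ((m + 1 : Nat) : Int) ++ [((m + 1 : Nat) : Int)]) =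
            (0 :: msCuts l lab ((m + 1 : Nat) : Int)) ++ [((m + 1 : Nat) : Int)] from rfl,
            List.getLastD_concat]
        rw [msWords_decomp e l inputs lab (((m + 1 : Nat) : Int) + 1), hPre, hLast]
        have hseg : msSeg e inputs (((m + 1 : Nat) : Int), ((m + 1 : Nat) : Int) + 1) =
            (msTok e inputs)[m + 1]'(by omega) := by
          unfold msSeg
          rw [slice_single (msTok e inputs) (m + 1) (by omega), joinE_singleton]
        rw [hseg, join_append_singleton _ _ (by rw [msWords_decomp]; simp)]
        unfold stepS
        rw [if_neg (show ¬ ((((m + 1 : Nat) : Int)) == 0) = true from by simp; omega)]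
        unfold msFlag at hB
        rw [if_pos hB, msTok_getElem e inputs (m + 1) hlt]
      · -- index m+1 extends the current last word
        have hcuts : msCuts l lab (((m + 1 : Nat) : Int) + 1) =
            msCuts l lab ((m + 1 : Nat) : Int) := by
          rw [hflag, if_neg hB, List.append_nil]
        have hPre : msPre e l inputs lab (((m + 1 : Nat) : Int) + 1) =
            msPre e l inputs lab ((m + 1 : Nat) : Int) := by
          unfold msPre
          rw [hcuts]
        have hLast : msLast l lab (((m + 1 : Nat) : Int) + 1) = msLast l lab ((m + 1 : Nat) : Int) := by
          unfold msLast
          rw [hcuts]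
        have hseg : msSeg e inputs (msLast l lab ((m + 1 : Nat) : Int), ((m + 1 : Nat) : Int) + 1) =
            msSeg e inputs (msLast l lab ((m + 1 : Nat) : Int), ((m + 1 : Nat) : Int)) ++
              (msTok e inputs)[m + 1]'(by omega) := by
          unfold msSeg
          rw [slice_extend (msTok e inputs) (msLast l lab ((m + 1 : Nat) : Int)) (m + 1)
            hLb.1 hLb.2 (by omega), joinE_append_singleton]
        rw [msWords_decomp e l inputs lab (((m + 1 : Nat) : Int) + 1), hPre, hLast, hseg,
          join_snoc_extend, ← msWords_decomp]
        unfold stepS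
        rw [if_neg (show ¬ ((((m + 1 : Nat) : Int)) == 0) = true from by simp; omega)]
        unfold msFlag at hB
        rw [if_neg hB, msTok_getElem e inputs (m + 1) hlt]

-- ===== VERDICT (by name: the statement is the Claim_ definition above) =====
theorem make_sentence_spec : Claim_equal_make_sentence := by
  intro inputs predicts labels e l _ _
  unfold Spec_make_sentence
  rw [make_sentence_eq_folds, alt_eq_words]
  have h1 := fold_eq_words e l inputs predicts inputs.length le_rfl
  have h2 := fold_eq_words e l inputs labels inputs.length le_rfl
  simp only [PySem.List.len_eq]
  rw [h1, h2]
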